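-- pv_equiv track=rewrite | github.com/BrunoC-L/LOG8415 | tp2/network_problem.py | create_friend_connection
-- ===== SOURCE A (Python) =====
-- VALUE_DIRECT_FRIEND = 0
--
-- VALUE_COMMON_FRIEND = 1
--
-- def create_friend_connection(user, friends):
--     """
--     This function create connection between user and all friend, and between all his friend and specify if there are friend or not with 0 or 1 flag
--
--     args:
--         user : type int, id of the user
--         friends : type List(int), list of id
--
--     output: list of tuple (key,value) with key as a tuple of id and value as 0 or 1
--         Example: [((0,1),0), ((0,2),1), ....] --> users 0 and 1 are friends and users 0 and 2 have a mutual friend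
--     """
--     list_connections = []
--     # add friend connections
--     for friend in friends:
--         # need to order the users_id in key
--         key = (user, friend) if user < friend else (friend, user)
--         list_connections.append((key, VALUE_DIRECT_FRIEND))
--
--     # add connection between user's friends
--     n = len(friends)
--     for i, friend in enumerate(friends):
--         for j in range(i + 1, n):
--             otherFriend = friends[j]
--             # need to order the users_id in key
--             key = (friend, otherFriend) if friend < otherFriend else (otherFriend, friend)
--             list_connections.append((key, VALUE_COMMON_FRIEND))
--
--     return list_connections
-- ===== SOURCE B (Python) =====
-- VALUE_DIRECT_FRIEND = 0
--
-- VALUE_COMMON_FRIEND = 1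
--
-- def _pairs(xs):
--     # all ordered-position pairs of xs: loop over a shrinking suffix,
--     # pairing the current head with every later element
--     out = []
--     while xs:
--         head, xs = xs[0], xs[1:]
--         out += [(head, y) for y in xs]
--     return out
--
-- def create_friend_connection(user, friends):
--     n = len(friends)
--     return [((a, b) if a < b else (b, a),
--              VALUE_DIRECT_FRIEND if i < n else VALUE_COMMON_FRIEND)
--             for i, (a, b) in enumerate(_pairs([user] + friends))]
-- ===== Notes on version B (the rewrite author's own statement) =====
-- stated objective: alternative
-- what changed: Replaces A's two separate passes (direct-friend loop plus index-nested friend-pair loop) by one comprehension over the recursively generated combinations of [user]+friends, choosing the flag by an index cutoff.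
import Mathlib
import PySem

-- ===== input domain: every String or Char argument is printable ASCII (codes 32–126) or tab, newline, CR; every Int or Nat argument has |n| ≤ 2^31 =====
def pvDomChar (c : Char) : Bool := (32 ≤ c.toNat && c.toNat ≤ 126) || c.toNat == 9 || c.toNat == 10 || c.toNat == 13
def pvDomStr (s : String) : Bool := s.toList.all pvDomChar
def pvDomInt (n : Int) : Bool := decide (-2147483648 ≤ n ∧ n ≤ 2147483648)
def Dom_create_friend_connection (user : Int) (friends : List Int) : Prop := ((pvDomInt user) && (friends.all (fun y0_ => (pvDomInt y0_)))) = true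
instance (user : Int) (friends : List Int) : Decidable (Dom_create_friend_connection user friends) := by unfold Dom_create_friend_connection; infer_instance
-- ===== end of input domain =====

-- B merges A's two passes (direct-friend loop + nested friend-pair loop) into one enumerate pass
-- over the combinations of [user]+friends, choosing the flag by an index cutoff (objective: alternative).

-- ===== PORT A =====
def create_friend_connection (user : Int) (friends : List Int) : List ((Int × Int) × Int) :=
  let lc := friends.foldl (fun acc friend =>
    acc ++ [((if user < friend then (user, friend) else (friend, user)), 0)]) []
  let n : Int := friends.length
  (PySem.List.enumerate friends).foldl (fun acc p =>
    (PySem.List.pyRange (p.1 + 1) n 1).foldl (fun acc2 j =>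
      let otherFriend := PySem.List.pyGetD friends j 0
      acc2 ++ [((if p.2 < otherFriend then (p.2, otherFriend) else (otherFriend, p.2)), 1)]) acc) lc

-- ===== PORT B =====
-- B's _pairs: loop over a shrinking suffix, pairing the head with every later element
def pvPairsGo : List Int → List (Int × Int) → List (Int × Int)
  | [], out => out
  | head :: rest, out => pvPairsGo rest (out ++ rest.map (fun y => (head, y)))

def create_friend_connection_alt (user : Int) (friends : List Int) : List ((Int × Int) × Int) :=
  let n : Int := friends.length
  (PySem.List.enumerate (pvPairsGo (user :: friends) [])).map
    (fun p => ((if p.2.1 < p.2.2 then p.2 else (p.2.2, p.2.1)), if p.1 < n then 0 else 1))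

-- ===== PRECONDITION & SPEC =====
def Spec_create_friend_connection (user : Int) (friends : List Int) (out : List ((Int × Int) × Int)) : Prop := out = create_friend_connection_alt user friends
instance (user : Int) (friends : List Int) (out : List ((Int × Int) × Int)) : Decidable (Spec_create_friend_connection user friends out) := by unfold Spec_create_friend_connection; infer_instance

-- ===== CLAIM (what is proved, stated in full; the proofs are below) =====
def Claim_equal_create_friend_connection : Prop := ∀ (user : Int) (friends : List Int), Dom_create_friend_connection user friends → Spec_create_friend_connection user friends (create_friend_connection user friends)

-- ===== LEMMAS AND PROOFS =====

-- proof-side description of pvPairsGo's result, without the accumulator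
def pvPairs : List Int → List (Int × Int)
  | [] => []
  | x :: xs => xs.map (fun y => (x, y)) ++ pvPairs xs

theorem pvPairsGo_eq (xs : List Int) (out : List (Int × Int)) :
    pvPairsGo xs out = out ++ pvPairs xs := by
  induction xs generalizing out with
  | nil => simp [pvPairsGo, pvPairs]
  | cons x xs ih => simp [pvPairsGo, pvPairs, ih]

-- B's enumerate-map with all indices below the cutoff: flag 0 throughout
theorem pvMapEnum_lt (xs : List (Int × Int)) (s n : Int) (h : s + xs.length ≤ n) :
    (PySem.List.enumerate xs s).map
        (fun p => ((if p.2.1 < p.2.2 then p.2 else (p.2.2, p.2.1)), if p.1 < n then (0:Int) else 1))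
      = xs.map (fun q => ((if q.1 < q.2 then q else (q.2, q.1)), (0:Int))) := by
  induction xs generalizing s with
  | nil => simp [PySem.List.enumerate_nil]
  | cons x xs ih =>
    have hs : s < n := by simp only [List.length_cons] at h; push_cast at h; omega
    rw [PySem.List.enumerate_cons]
    simp only [List.map_cons, if_pos hs]
    rw [ih (s + 1) (by simp only [List.length_cons] at h; push_cast at h ⊢; omega)]

-- B's enumerate-map with all indices at or above the cutoff: flag 1 throughout
theorem pvMapEnum_ge (xs : List (Int × Int)) (s n : Int) (h : n ≤ s) :
    (PySem.List.enumerate xs s).map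
        (fun p => ((if p.2.1 < p.2.2 then p.2 else (p.2.2, p.2.1)), if p.1 < n then (0:Int) else 1))
      = xs.map (fun q => ((if q.1 < q.2 then q else (q.2, q.1)), (1:Int))) := by
  induction xs generalizing s with
  | nil => simp [PySem.List.enumerate_nil]
  | cons x xs ih =>
    rw [PySem.List.enumerate_cons]
    simp only [List.map_cons, if_neg (by omega : ¬ s < n)]
    rw [ih (s + 1) (by omega)]

-- A's nested loop, characterised: it appends the flagged pairs of the remaining suffix
theorem pvLoopA (friends : List Int) (xs : List Int) (s : Nat)
    (hxs : friends.drop s = xs) (acc : List ((Int × Int) × Int)) :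
    (PySem.List.enumerate xs (s : Int)).foldl (fun acc p =>
      (PySem.List.pyRange (p.1 + 1) (friends.length : Int) 1).foldl (fun acc2 j =>
        acc2 ++ [((if p.2 < PySem.List.pyGetD friends j 0 then (p.2, PySem.List.pyGetD friends j 0)
                   else (PySem.List.pyGetD friends j 0, p.2)), 1)]) acc) acc
      = acc ++ (pvPairs xs).map (fun q => ((if q.1 < q.2 then q else (q.2, q.1), (1:Int)))) := by
  induction xs generalizing s acc with
  | nil => simp [PySem.List.enumerate_nil, pvPairs]
  | cons x xs ih =>
    have hdrop : friends.drop (s + 1) = xs := by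
      have h1 : friends.drop (s + 1) = (friends.drop s).drop 1 := by
        rw [List.drop_drop, Nat.add_comm]
      rw [h1, hxs]; rfl
    rw [PySem.List.enumerate_cons, List.foldl_cons]
    have hinner :
        (PySem.List.pyRange ((s : Int) + 1) (friends.length : Int) 1).foldl (fun acc2 j =>
          acc2 ++ [((if x < PySem.List.pyGetD friends j 0 then (x, PySem.List.pyGetD friends j 0)
                     else (PySem.List.pyGetD friends j 0, x)), 1)]) acc
        = acc ++ xs.map (fun y => ((if x < y then (x, y) else (y, x)), (1:Int))) := by
      rw [PySem.List.foldl_pyRange_pyGetD'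
            (f := fun acc2 v => acc2 ++ [((if x < v then (x, v) else (v, x)), (1:Int))])
            (xs := friends) (d := 0) (init := acc) (a := (s : Int) + 1) (by omega)]
      have h2 : ((s : Int) + 1).toNat = s + 1 := by omega
      rw [h2, hdrop, PySem.List.foldl_append_singleton_eq_map]
    simp only [hinner]
    have h3 : ((s : Int) + 1) = ((s + 1 : Nat) : Int) := by push_cast; ring
    rw [h3, ih (s + 1) hdrop]
    simp [pvPairs, List.map_map, Function.comp]

-- ===== VERDICT (by name: the statement is the Claim_ definition above) =====
theorem create_friend_connection_spec : Claim_equal_create_friend_connection := by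
  intro user friends _
  unfold Spec_create_friend_connection create_friend_connection create_friend_connection_alt
  simp only [pvPairsGo_eq, List.nil_append, pvPairs, PySem.List.enumerate_append, List.map_append, List.length_map, zero_add]
  rw [pvMapEnum_lt _ 0 (friends.length : Int) (by simp),
      pvMapEnum_ge _ (friends.length : Int) (friends.length : Int) (by omega),
      PySem.List.foldl_append_singleton_eq_map]
  have := pvLoopA friends friends 0 rfl
    (friends.map (fun friend => ((if user < friend then (user, friend) else (friend, user)), 0)))
  simp only [Nat.cast_zero] at this
  simp only [List.nil_append] at this ⊢
  rw [this]
  simp [List.map_map, Function.comp]
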